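-- pv_equiv track=rewrite | github.com/guepster/recondns | src/recondns/diffs.py | _simple_list_diff
-- ===== SOURCE A (Python) =====
-- def _simple_list_diff(old: list[str], new: list[str]) -> dict[str, list[str]]:
--     """
--     Retourne {added: [...], removed: [...]} entre deux listes.
--     """
--     old_set: set[str] = {str(x) for x in old}
--     new_set: set[str] = {str(x) for x in new}
--     added = sorted(new_set - old_set)
--     removed = sorted(old_set - new_set)
--     return {
--         "added": added,
--         "removed": removed,
--     }
-- ===== SOURCE B (Python) =====
-- def _simple_list_diff(old: list[str], new: list[str]) -> dict[str, list[str]]: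
--     """
--     Retourne {added: [...], removed: [...]} entre deux listes.
--     Merge-based: sort both lists once, then walk them with two indices,
--     emitting keys present on only one side and skipping duplicate runs.
--     """
--     o = sorted(str(x) for x in old)
--     n = sorted(str(x) for x in new)
--     added: list[str] = []
--     removed: list[str] = []
--     i = j = 0
--     while i < len(o) and j < len(n):
--         if o[i] < n[j]:
--             k = o[i]
--             removed.append(k)
--             while i < len(o) and o[i] == k:
--                 i += 1
--         elif n[j] < o[i]:
--             k = n[j]
--             added.append(k)
--             while j < len(n) and n[j] == k:
--                 j += 1
--         else:
--             k = o[i]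
--             while i < len(o) and o[i] == k:
--                 i += 1
--             while j < len(n) and n[j] == k:
--                 j += 1
--     while i < len(o):
--         k = o[i]
--         removed.append(k)
--         while i < len(o) and o[i] == k:
--             i += 1
--     while j < len(n):
--         k = n[j]
--         added.append(k)
--         while j < len(n) and n[j] == k:
--             j += 1
--     return {"added": added, "removed": removed}
-- ===== Notes on version B (the rewrite author's own statement) =====
-- stated objective: alternative
-- what changed: Replaces the two set-difference constructions followed by two sorts with one sort of each input and a single two-pointer merge that emits one-sided keys and skips duplicate runs.
import Mathlib
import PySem

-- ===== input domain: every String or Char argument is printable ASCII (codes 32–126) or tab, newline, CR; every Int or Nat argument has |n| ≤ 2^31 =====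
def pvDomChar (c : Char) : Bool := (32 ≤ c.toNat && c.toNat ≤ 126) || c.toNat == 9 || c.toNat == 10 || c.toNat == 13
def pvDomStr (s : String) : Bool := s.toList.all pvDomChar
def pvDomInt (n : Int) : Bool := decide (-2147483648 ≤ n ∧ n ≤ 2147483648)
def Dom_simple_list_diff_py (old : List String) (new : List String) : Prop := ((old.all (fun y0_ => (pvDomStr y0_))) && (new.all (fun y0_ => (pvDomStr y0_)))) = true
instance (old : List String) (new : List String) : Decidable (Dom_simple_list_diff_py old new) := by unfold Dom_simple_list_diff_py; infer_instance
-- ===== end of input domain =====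

-- B replaces the two set differences + two sorts by one sort of each input followed by a
-- single two-pointer merge that emits one-sided keys and skips duplicate runs (objective: alternative).

-- ===== PORT A =====
def simple_list_diff_py (old : List String) (new : List String) : List (String × List String) :=
  let old_set : PySem.Set String := PySem.Set.ofList old
  let new_set : PySem.Set String := PySem.Set.ofList new
  let added := PySem.List.sorted (PySem.Set.diff new_set old_set) (fun x => x) false
  let removed := PySem.List.sorted (PySem.Set.diff old_set new_set) (fun x => x) false
  [("added", added), ("removed", removed)]

-- ===== PORT B =====
-- 'while i < len(o) and o[i] == k: i += 1': skip the leading run of k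
def pvSkipRun (k : String) : List String → List String
  | [] => []
  | x :: xs => if x = k then pvSkipRun k xs else x :: xs

theorem pvSkipRun_length_le (k : String) (xs : List String) :
    (pvSkipRun k xs).length ≤ xs.length := by
  induction xs with
  | nil => simp [pvSkipRun]
  | cons x xs ih =>
    simp only [pvSkipRun]
    split
    · simp only [List.length_cons]; omega
    · simp

-- one of the two trailing drain loops: emit the key, skip its run, continue
def pvDrain : List String → List String
  | [] => []
  | x :: xs => x :: pvDrain (pvSkipRun x xs)
termination_by xs => xs.length
decreasing_by have := pvSkipRun_length_le x xs; simp only [List.length_cons]; omega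

-- the main 'while i < len(o) and j < len(n)' loop; returns (added, removed)
def pvMergeDiff : List String → List String → List String × List String
  | [], ys => (pvDrain ys, [])
  | x :: xs, [] => ([], x :: pvDrain (pvSkipRun x xs))
  | x :: xs, y :: ys =>
    if x < y then
      let r := pvMergeDiff (pvSkipRun x xs) (y :: ys)
      (r.1, x :: r.2)
    else if y < x then
      let r := pvMergeDiff (x :: xs) (pvSkipRun y ys)
      (y :: r.1, r.2)
    else
      pvMergeDiff (pvSkipRun x xs) (pvSkipRun x ys)
termination_by xs ys => xs.length + ys.length
decreasing_by
  · have := pvSkipRun_length_le x xs; simp; omega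
  · have := pvSkipRun_length_le y ys; simp; omega
  · have h1 := pvSkipRun_length_le x xs; have h2 := pvSkipRun_length_le x ys; simp; omega

def simple_list_diff_py_alt (old : List String) (new : List String) : List (String × List String) :=
  let o := PySem.List.sorted old (fun x => x) false
  let n := PySem.List.sorted new (fun x => x) false
  let r := pvMergeDiff o n
  [("added", r.1), ("removed", r.2)]

-- ===== PRECONDITION & SPEC =====
def Spec_simple_list_diff_py (old : List String) (new : List String) (out : List (String × List String)) : Prop := out = simple_list_diff_py_alt old new
instance (old : List String) (new : List String) (out : List (String × List String)) : Decidable (Spec_simple_list_diff_py old new out) := by unfold Spec_simple_list_diff_py; infer_instance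

-- ===== CLAIM (what is proved, stated in full; the proofs are below) =====
def Claim_equal_simple_list_diff_py : Prop := ∀ (old : List String) (new : List String), Dom_simple_list_diff_py old new → Spec_simple_list_diff_py old new (simple_list_diff_py old new)

-- ===== LEMMAS AND PROOFS =====

theorem pvSkipRun_spec (k : String) (xs : List String)
    (hx : xs.Pairwise (· ≤ ·)) (hall : ∀ a ∈ xs, k ≤ a) :
    (pvSkipRun k xs).Pairwise (· ≤ ·) ∧ (∀ a ∈ pvSkipRun k xs, k < a) ∧
      (∀ a, a ∈ pvSkipRun k xs ↔ a ∈ xs ∧ a ≠ k) := by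
  induction xs with
  | nil => simp [pvSkipRun]
  | cons x xs ih =>
    rw [List.pairwise_cons] at hx
    by_cases hxk : x = k
    · subst hxk
      have := ih hx.2 (fun a ha => le_trans (hall x (by simp)) (hx.1 a ha))
      rw [show pvSkipRun x (x :: xs) = pvSkipRun x xs from by simp [pvSkipRun]]
      refine ⟨this.1, this.2.1, fun a => ?_⟩
      rw [this.2.2 a]
      constructor
      · rintro ⟨h1, h2⟩; exact ⟨by simp [h1], h2⟩
      · rintro ⟨h1, h2⟩
        rcases List.mem_cons.mp h1 with h | h
        · exact absurd h h2
        · exact ⟨h, h2⟩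
    · have hkx : k < x := lt_of_le_of_ne (hall x (by simp)) (Ne.symm hxk)
      simp only [pvSkipRun, if_neg hxk]
      refine ⟨List.pairwise_cons.mpr hx, fun a ha => ?_, fun a => ?_⟩
      · rcases List.mem_cons.mp ha with h | h
        · exact h ▸ hkx
        · exact lt_of_lt_of_le hkx (hx.1 a h)
      · constructor
        · intro ha
          refine ⟨ha, ?_⟩
          rcases List.mem_cons.mp ha with h | h
          · exact h ▸ hxk
          · exact ne_of_gt (lt_of_lt_of_le hkx (hx.1 a h))
        · exact fun h => h.1

theorem pvDrain_spec (xs : List String) (hx : xs.Pairwise (· ≤ ·)) :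
    (pvDrain xs).Pairwise (· < ·) ∧ (∀ a, a ∈ pvDrain xs ↔ a ∈ xs) := by
  induction hn : xs.length using Nat.strong_induction_on generalizing xs with
  | _ n ih =>
  match xs with
  | [] => simp [pvDrain]
  | x :: xs =>
    rw [List.pairwise_cons] at hx
    have hs := pvSkipRun_spec x xs hx.2 hx.1
    have hlen : (pvSkipRun x xs).length < n := by
      have := pvSkipRun_length_le x xs; simp only [List.length_cons] at hn; omega
    have ih' := ih _ hlen _ hs.1 rfl
    simp only [pvDrain]
    constructor
    · refine List.pairwise_cons.mpr ⟨fun a ha => ?_, ih'.1⟩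
      exact hs.2.1 a ((ih'.2 a).mp ha)
    · intro a
      rw [List.mem_cons, ih'.2 a, hs.2.2 a, List.mem_cons]
      constructor
      · rintro (h | ⟨h, _⟩) <;> [exact Or.inl h; exact Or.inr h]
      · rintro (h | h)
        · exact Or.inl h
        · by_cases hax : a = x
          · exact Or.inl hax
          · exact Or.inr ⟨h, hax⟩

theorem pvMergeDiff_spec (xs ys : List String)
    (hx : xs.Pairwise (· ≤ ·)) (hy : ys.Pairwise (· ≤ ·)) :
    ((pvMergeDiff xs ys).1.Pairwise (· < ·)) ∧
    (∀ v, v ∈ (pvMergeDiff xs ys).1 ↔ v ∈ ys ∧ v ∉ xs) ∧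
    ((pvMergeDiff xs ys).2.Pairwise (· < ·)) ∧
    (∀ v, v ∈ (pvMergeDiff xs ys).2 ↔ v ∈ xs ∧ v ∉ ys) := by
  induction xs, ys using pvMergeDiff.induct with
  | case1 ys =>
    have h := pvDrain_spec ys hy
    simp only [pvMergeDiff]
    exact ⟨h.1, fun v => by simp [h.2 v], by simp, by simp⟩
  | case2 x xs =>
    rw [List.pairwise_cons] at hx
    have hs := pvSkipRun_spec x xs hx.2 hx.1
    have hd := pvDrain_spec _ hs.1
    simp only [pvMergeDiff]
    refine ⟨by simp, by simp, ?_, ?_⟩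
    · refine List.pairwise_cons.mpr ⟨fun a ha => hs.2.1 a ((hd.2 a).mp ha), hd.1⟩
    · intro v
      simp only [List.mem_cons, hd.2 v, hs.2.2 v, List.not_mem_nil, not_false_iff, and_true]
      constructor
      · rintro (h | ⟨h, _⟩) <;> [exact Or.inl h; exact Or.inr h]
      · rintro (h | h)
        · exact Or.inl h
        · by_cases hvx : v = x
          · exact Or.inl hvx
          · exact Or.inr ⟨h, hvx⟩
  | case3 x xs y ys hlt ih =>
    rw [List.pairwise_cons] at hx
    have hs := pvSkipRun_spec x xs hx.2 hx.1
    have ih' := ih hs.1 hy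
    rw [List.pairwise_cons] at hy
    have hxy : ∀ v ∈ y :: ys, x < v := by
      intro v hv
      rcases List.mem_cons.mp hv with h | h
      · exact h ▸ hlt
      · exact lt_of_lt_of_le hlt (hy.1 v h)
    simp only [pvMergeDiff, if_pos hlt]
    refine ⟨ih'.1, fun v => ?_, ?_, fun v => ?_⟩
    · rw [ih'.2.1 v]
      constructor
      · rintro ⟨h1, h2⟩
        refine ⟨h1, fun hc => ?_⟩
        rcases List.mem_cons.mp hc with h | h
        · exact absurd (h ▸ hxy v h1) (lt_irrefl x)
        · exact h2 ((hs.2.2 v).mpr ⟨h, ne_of_gt (hxy v h1)⟩)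
      · rintro ⟨h1, h2⟩
        refine ⟨h1, fun hc => h2 ?_⟩
        exact List.mem_cons.mpr (Or.inr ((hs.2.2 v).mp hc).1)
    · refine List.pairwise_cons.mpr ⟨fun a ha => ?_, ih'.2.2.1⟩
      have := ((ih'.2.2.2 a).mp ha).1
      exact hs.2.1 a this
    · rw [List.mem_cons, ih'.2.2.2 v]
      have hxny : x ∉ y :: ys := fun hc => absurd (hxy x hc) (lt_irrefl x)
      simp only [List.mem_cons, hs.2.2 v]
      constructor
      · rintro (h | ⟨⟨h1, h2⟩, h3⟩)
        · exact ⟨Or.inl h, h ▸ fun hc => hxny (List.mem_cons.mpr hc)⟩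
        · exact ⟨Or.inr h1, h3⟩
      · rintro ⟨h1, h2⟩
        rcases h1 with h | h
        · exact Or.inl h
        · by_cases hvx : v = x
          · exact Or.inl hvx
          · exact Or.inr ⟨⟨h, hvx⟩, h2⟩
  | case4 x xs y ys hnlt hlt ih =>
    rw [List.pairwise_cons] at hy
    have hs := pvSkipRun_spec y ys hy.2 hy.1
    have ih' := ih hx hs.1
    rw [List.pairwise_cons] at hx
    have hyx : ∀ v ∈ x :: xs, y < v := by
      intro v hv
      rcases List.mem_cons.mp hv with h | h
      · exact h ▸ hlt
      · exact lt_of_lt_of_le hlt (hx.1 v h)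
    simp only [pvMergeDiff, if_neg hnlt, if_pos hlt]
    have hynx : y ∉ x :: xs := fun hc => absurd (hyx y hc) (lt_irrefl y)
    refine ⟨?_, fun v => ?_, ih'.2.2.1, fun v => ?_⟩
    · refine List.pairwise_cons.mpr ⟨fun a ha => ?_, ih'.1⟩
      have := ((ih'.2.1 a).mp ha).1
      exact hs.2.1 a this
    · rw [List.mem_cons, ih'.2.1 v]
      simp only [List.mem_cons, hs.2.2 v]
      constructor
      · rintro (h | ⟨⟨h1, h2⟩, h3⟩)
        · exact ⟨Or.inl h, h ▸ fun hc => hynx (List.mem_cons.mpr hc)⟩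
        · exact ⟨Or.inr h1, h3⟩
      · rintro ⟨h1, h2⟩
        rcases h1 with h | h
        · exact Or.inl h
        · by_cases hvy : v = y
          · exact Or.inl hvy
          · exact Or.inr ⟨⟨h, hvy⟩, h2⟩
    · rw [ih'.2.2.2 v]
      constructor
      · rintro ⟨h1, h2⟩
        refine ⟨h1, fun hc => ?_⟩
        rcases List.mem_cons.mp hc with h | h
        · exact absurd (h ▸ hyx v h1) (lt_irrefl y)
        · exact h2 ((hs.2.2 v).mpr ⟨h, ne_of_gt (hyx v h1)⟩)
      · rintro ⟨h1, h2⟩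
        refine ⟨h1, fun hc => h2 ?_⟩
        exact List.mem_cons.mpr (Or.inr ((hs.2.2 v).mp hc).1)
  | case5 x xs y ys hnlt1 hnlt2 ih =>
    have hxy : x = y := le_antisymm (not_lt.mp hnlt2) (not_lt.mp hnlt1)
    subst hxy
    rw [List.pairwise_cons] at hx hy
    have hsx := pvSkipRun_spec x xs hx.2 hx.1
    have hsy := pvSkipRun_spec x ys hy.2 hy.1
    have ih' := ih hsx.1 hsy.1
    simp only [pvMergeDiff, if_neg hnlt1]
    refine ⟨ih'.1, fun v => ?_, ih'.2.2.1, fun v => ?_⟩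
    · rw [ih'.2.1 v]
      simp only [List.mem_cons, hsy.2.2 v, hsx.2.2 v]
      constructor
      · rintro ⟨⟨h1, h2⟩, h3⟩
        exact ⟨Or.inr h1, fun hc => by
          rcases hc with h | h
          · exact h2 h
          · exact h3 ⟨h, h2⟩⟩
      · rintro ⟨h1, h2⟩
        have hvx : v ≠ x := fun hc => h2 (Or.inl hc)
        rcases h1 with h | h
        · exact absurd h hvx
        · exact ⟨⟨h, hvx⟩, fun hc => h2 (Or.inr hc.1)⟩
    · rw [ih'.2.2.2 v]
      simp only [List.mem_cons, hsy.2.2 v, hsx.2.2 v]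
      constructor
      · rintro ⟨⟨h1, h2⟩, h3⟩
        exact ⟨Or.inr h1, fun hc => by
          rcases hc with h | h
          · exact h2 h
          · exact h3 ⟨h, h2⟩⟩
      · rintro ⟨h1, h2⟩
        have hvx : v ≠ x := fun hc => h2 (Or.inl hc)
        rcases h1 with h | h
        · exact absurd h hvx
        · exact ⟨⟨h, hvx⟩, fun hc => h2 (Or.inr hc.1)⟩

theorem pvMerge_eq_sorted_diff (old new : List String) :
    PySem.List.sorted (PySem.Set.diff (PySem.Set.ofList new) (PySem.Set.ofList old)) (fun x => x) false
      = (pvMergeDiff (PySem.List.sorted old (fun x => x) false) (PySem.List.sorted new (fun x => x) false)).1 ∧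
    PySem.List.sorted (PySem.Set.diff (PySem.Set.ofList old) (PySem.Set.ofList new)) (fun x => x) false
      = (pvMergeDiff (PySem.List.sorted old (fun x => x) false) (PySem.List.sorted new (fun x => x) false)).2 := by
  have hxo : (PySem.List.sorted old (fun x => x) false).Pairwise (· ≤ ·) :=
    PySem.List.sorted_pairwise old (fun x => x)
  have hxn : (PySem.List.sorted new (fun x => x) false).Pairwise (· ≤ ·) :=
    PySem.List.sorted_pairwise new (fun x => x)
  have hm := pvMergeDiff_spec _ _ hxo hxn
  constructor
  · refine PySem.List.sorted_eq_of_perm_of_pairwise_lt _ _ _ ?_ hm.1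
    refine (List.perm_ext_iff_of_nodup (hm.1.imp ne_of_lt) ?_).mpr ?_
    · exact PySem.Set.nodup_diff _ _ (PySem.Set.nodup_ofList new)
    · intro v
      rw [hm.2.1 v, PySem.Set.mem_diff, PySem.List.mem_sorted, PySem.List.mem_sorted,
        PySem.Set.mem_ofList, PySem.Set.mem_ofList]
  · refine PySem.List.sorted_eq_of_perm_of_pairwise_lt _ _ _ ?_ hm.2.2.1
    refine (List.perm_ext_iff_of_nodup (hm.2.2.1.imp ne_of_lt) ?_).mpr ?_
    · exact PySem.Set.nodup_diff _ _ (PySem.Set.nodup_ofList old)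
    · intro v
      rw [hm.2.2.2 v, PySem.Set.mem_diff, PySem.List.mem_sorted, PySem.List.mem_sorted,
        PySem.Set.mem_ofList, PySem.Set.mem_ofList]

-- ===== VERDICT (by name: the statement is the Claim_ definition above) =====
theorem simple_list_diff_py_spec : Claim_equal_simple_list_diff_py := by
  intro old new _
  unfold Spec_simple_list_diff_py simple_list_diff_py simple_list_diff_py_alt
  have h := pvMerge_eq_sorted_diff old new
  simp only [h.1, h.2]
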